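-- pv_equiv track=rewrite | github.com/pypi-data/pypi-mirror-381 | packages/cell-tracking-bc/cell_tracking_bc-2025.1-py3-none-any.whl/cell_tracking_BC/in_out/file/load.py | MinimalSubset
-- ===== SOURCE A (Python) =====
-- def MinimalSubset(labels, nodes):
--     """"""
--     output = []
--
--     for node in nodes:
--         if set(node[0]).issuperset(labels):
--             output.append(node)
--
--     if output.__len__() == 0:
--         raise RuntimeError(f"No minimal subsets: {labels} {nodes}")
--
--     min_length = min(_elm[0].__len__() for _elm in output)
--     output = [_elm for _elm in output if _elm[0].__len__() == min_length]
--
--     if output.__len__() == 0: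
--         raise RuntimeError(f"No minimal subsets: {labels} {nodes}")
--
--     max_time = max(_elm[1] for _elm in output)
--     output = [_elm for _elm in output if _elm[1] == max_time]
--
--     if output.__len__() == 0:
--         raise RuntimeError(f"No minimal subsets: {labels} {nodes}")
--
--     return output
-- ===== SOURCE B (Python) =====
-- def MinimalSubset(labels, nodes):
--     """"""
--     acc = []
--     best = None  # (length, time) of the current best superset nodes
--
--     for node in nodes:
--         if set(node[0]).issuperset(labels):
--             length = len(node[0])
--             time = node[1]
--             if best is None or length < best[0]:
--                 acc = [node]
--                 best = (length, time)
--             elif length == best[0] and time > best[1]: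
--                 acc = [node]
--                 best = (length, time)
--             elif length == best[0] and time == best[1]:
--                 acc.append(node)
--
--     if not acc:
--         raise RuntimeError(f"No minimal subsets: {labels} {nodes}")
--
--     return acc
-- ===== Notes on version B (the rewrite author's own statement) =====
-- stated objective: alternative
-- what changed: Replaced A's four passes (filter supersets, min of lengths, filter by min length, max of times, filter by max time) by one left-to-right pass maintaining an accumulator of current winners and the best (length, time) pair.
import Mathlib
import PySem

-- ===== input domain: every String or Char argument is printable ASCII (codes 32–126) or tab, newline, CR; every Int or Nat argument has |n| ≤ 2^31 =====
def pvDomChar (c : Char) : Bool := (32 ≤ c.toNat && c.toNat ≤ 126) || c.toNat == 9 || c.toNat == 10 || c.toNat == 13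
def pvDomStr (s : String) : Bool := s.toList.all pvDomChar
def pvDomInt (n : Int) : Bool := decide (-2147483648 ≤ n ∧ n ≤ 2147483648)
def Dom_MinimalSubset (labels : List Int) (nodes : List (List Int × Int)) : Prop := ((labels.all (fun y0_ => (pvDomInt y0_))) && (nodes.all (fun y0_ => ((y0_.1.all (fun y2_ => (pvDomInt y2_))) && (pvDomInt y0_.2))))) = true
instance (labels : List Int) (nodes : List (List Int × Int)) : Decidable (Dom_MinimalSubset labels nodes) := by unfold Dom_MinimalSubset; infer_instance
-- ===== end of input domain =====

-- B replaces A's multi-pass filter/min/filter/max/filter chain by one accumulator pass (objective: alternative decomposition, same cost).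

-- ===== PORT A =====
-- set(node[0]).issuperset(labels): every label occurs in node[0]
def pvSup (labels : List Int) (node : List Int × Int) : Bool :=
  labels.all (fun l => node.1.contains l)

-- Python's min(...)/max(...) over a generator, transliterated as a fold (none = empty sequence, where A raises before calling them)
def pvMin? (l : List Int) : Option Int :=
  match l with | [] => none | h :: t => some (t.foldl min h)
def pvMax? (l : List Int) : Option Int :=
  match l with | [] => none | h :: t => some (t.foldl max h)

-- A's `output`/`min_length`/`max_time` locals are inlined (the filter chain is kept step for step)
def MinimalSubset (labels : List Int) (nodes : List (List Int × Int)) : List (List Int × Int) :=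
  match pvMin? ((nodes.filter (fun node => pvSup labels node)).map (fun e => (e.1.length : Int))) with
  | none => []   -- A raises RuntimeError here (excluded by Pre_MinimalSubset)
  | some minLength =>
    match pvMax? (((nodes.filter (fun node => pvSup labels node)).filter
        (fun e => ((e.1.length : Int) == minLength))).map (fun e => e.2)) with
    | none => []   -- A raises RuntimeError here (unreachable: the list is nonempty)
    | some maxTime =>
      ((nodes.filter (fun node => pvSup labels node)).filter
        (fun e => ((e.1.length : Int) == minLength))).filter (fun e => e.2 == maxTime)

-- ===== PORT B =====
-- one step of B's single pass: accumulator of current winners + best (length, time)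
def pvStep (labels : List Int) (st : List (List Int × Int) × Option (Int × Int))
    (node : List Int × Int) : List (List Int × Int) × Option (Int × Int) :=
  if labels.all (fun l => node.1.contains l) then
    match st.2 with
    | none => ([node], some ((node.1.length : Int), node.2))
    | some best =>
      if (node.1.length : Int) < best.1 then ([node], some ((node.1.length : Int), node.2))
      else if (node.1.length : Int) = best.1 ∧ node.2 > best.2 then ([node], some ((node.1.length : Int), node.2))
      else if (node.1.length : Int) = best.1 ∧ node.2 = best.2 then (st.1 ++ [node], st.2)
      else st
  else st

def MinimalSubset_alt (labels : List Int) (nodes : List (List Int × Int)) : List (List Int × Int) :=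
  (nodes.foldl (pvStep labels) ([], none)).1
  -- B raises RuntimeError when this is [] (excluded by Pre_MinimalSubset)

-- ===== PRECONDITION & SPEC =====
-- Pre_ excludes exactly the inputs on which A (and B) raise RuntimeError: no node whose labels are a superset of `labels`.
def Pre_MinimalSubset (labels : List Int) (nodes : List (List Int × Int)) : Prop :=
  ∃ node ∈ nodes, ∀ l ∈ labels, l ∈ node.1
instance (labels : List Int) (nodes : List (List Int × Int)) : Decidable (Pre_MinimalSubset labels nodes) := by unfold Pre_MinimalSubset; infer_instance

def pvWitness_MinimalSubset : List Int × (List (List Int × Int)) := ([1], [([1, 2], 3)])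

def Spec_MinimalSubset (labels : List Int) (nodes : List (List Int × Int)) (out : List (List Int × Int)) : Prop := out = MinimalSubset_alt labels nodes
instance (labels : List Int) (nodes : List (List Int × Int)) (out : List (List Int × Int)) : Decidable (Spec_MinimalSubset labels nodes out) := by unfold Spec_MinimalSubset; infer_instance

-- ===== CLAIM (what is proved, stated in full; the proofs are below) =====
def Claim_equal_MinimalSubset : Prop := ∀ (labels : List Int) (nodes : List (List Int × Int)), Dom_MinimalSubset labels nodes → Pre_MinimalSubset labels nodes → Spec_MinimalSubset labels nodes (MinimalSubset labels nodes)

-- ===== LEMMAS AND PROOFS =====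

-- the closed-form state that B's fold maintains: A's chain applied to the filtered list, plus the best (length, time)
def pvState (S : List (List Int × Int)) : List (List Int × Int) × Option (Int × Int) :=
  match pvMin? (S.map (fun e => (e.1.length : Int))) with
  | none => ([], none)
  | some m =>
    match pvMax? ((S.filter (fun e => ((e.1.length : Int) == m))).map (fun e => e.2)) with
    | none => ([], none)
    | some t =>
      ((S.filter (fun e => ((e.1.length : Int) == m))).filter (fun e => e.2 == t), some (m, t))

lemma pvMin?_concat (l : List Int) (a : Int) :
    pvMin? (l ++ [a]) = some (match pvMin? l with | none => a | some m => min m a) := by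
  cases l with
  | nil => simp [pvMin?]
  | cons h t => simp [pvMin?, List.foldl_append]

lemma pvMax?_concat (l : List Int) (a : Int) :
    pvMax? (l ++ [a]) = some (match pvMax? l with | none => a | some m => max m a) := by
  cases l with
  | nil => simp [pvMax?]
  | cons h t => simp [pvMax?, List.foldl_append]

lemma foldl_min_le_init (t : List Int) (b : Int) : t.foldl min b ≤ b := by
  induction t generalizing b with
  | nil => simp
  | cons x t ih => exact le_trans (ih (min b x)) (min_le_left _ _)

lemma le_foldl_max_init (t : List Int) (b : Int) : b ≤ t.foldl max b := by
  induction t generalizing b with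
  | nil => simp
  | cons x t ih => exact le_trans (le_max_left b x) (ih (max b x))

lemma foldl_min_le_mem (t : List Int) (b : Int) : ∀ a ∈ t, t.foldl min b ≤ a := by
  induction t generalizing b with
  | nil => simp
  | cons x t ih =>
    intro a ha
    rcases List.mem_cons.mp ha with rfl | ha
    · exact le_trans (foldl_min_le_init t (min b a)) (min_le_right _ _)
    · exact ih (min b x) a ha

lemma foldl_max_mem_le (t : List Int) (b : Int) : ∀ a ∈ t, a ≤ t.foldl max b := by
  induction t generalizing b with
  | nil => simp
  | cons x t ih =>
    intro a ha
    rcases List.mem_cons.mp ha with rfl | ha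
    · exact le_trans (le_max_right b a) (le_foldl_max_init t (max b a))
    · exact ih (max b x) a ha

lemma pvMin?_le {l : List Int} {m : Int} (h : pvMin? l = some m) : ∀ a ∈ l, m ≤ a := by
  cases l with
  | nil => simp [pvMin?] at h
  | cons x t =>
    simp [pvMin?] at h
    intro a ha
    rcases List.mem_cons.mp ha with rfl | ha
    · exact h ▸ foldl_min_le_init t a
    · exact h ▸ foldl_min_le_mem t x a ha

lemma pvMax?_ge {l : List Int} {m : Int} (h : pvMax? l = some m) : ∀ a ∈ l, a ≤ m := by
  cases l with
  | nil => simp [pvMax?] at h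
  | cons x t =>
    simp [pvMax?] at h
    intro a ha
    rcases List.mem_cons.mp ha with rfl | ha
    · exact h ▸ le_foldl_max_init t a
    · exact h ▸ foldl_max_mem_le t x a ha

lemma foldl_min_mem (t : List Int) (b : Int) : t.foldl min b = b ∨ t.foldl min b ∈ t := by
  induction t generalizing b with
  | nil => left; rfl
  | cons y t ih =>
    rcases ih (min b y) with h | h
    · rcases min_choice b y with h2 | h2
      · left; rw [List.foldl_cons, h, h2]
      · right; rw [List.foldl_cons, h, h2]; exact List.mem_cons_self
    · right; exact List.mem_cons_of_mem _ h

lemma pvMin?_mem {l : List Int} {m : Int} (h : pvMin? l = some m) : m ∈ l := by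
  cases l with
  | nil => simp [pvMin?] at h
  | cons x t =>
    simp [pvMin?] at h
    subst h
    rcases foldl_min_mem t x with h | h
    · rw [h]; exact List.mem_cons_self
    · exact List.mem_cons_of_mem _ h

lemma pvState_some {S : List (List Int × Int)} {m t : Int}
    (h1 : pvMin? (S.map (fun e => (e.1.length : Int))) = some m)
    (h2 : pvMax? ((S.filter (fun e => ((e.1.length : Int) == m))).map (fun e => e.2)) = some t) :
    pvState S = ((S.filter (fun e => ((e.1.length : Int) == m))).filter (fun e => e.2 == t), some (m, t)) := by
  unfold pvState
  simp only [h1, h2]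

-- A's chain equals the first component of pvState on the filtered list
lemma A_eq_state (labels : List Int) (nodes : List (List Int × Int)) :
    MinimalSubset labels nodes = (pvState (nodes.filter (fun node => pvSup labels node))).1 := by
  unfold MinimalSubset pvState
  cases h1 : pvMin? ((nodes.filter (fun node => pvSup labels node)).map (fun e => (e.1.length : Int))) with
  | none => simp
  | some m =>
    cases h2 : pvMax? (((nodes.filter (fun node => pvSup labels node)).filter
        (fun e => ((e.1.length : Int) == m))).map (fun e => e.2)) with
    | none =>
      simp only [List.filter_filter] at h2
      simp [h2]
    | some t =>
      simp only [List.filter_filter] at h2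
      simp [h2]

-- the key step: appending one superset node to the filtered list is exactly one pvStep
lemma state_concat (labels : List Int) (S : List (List Int × Int)) (x : List Int × Int)
    (hx : labels.all (fun l => x.1.contains l) = true) :
    pvStep labels (pvState S) x = pvState (S ++ [x]) := by
  cases h1 : pvMin? (S.map (fun e => (e.1.length : Int))) with
  | none =>
    have hS : S = [] := by
      cases S with
      | nil => rfl
      | cons a t => simp [pvMin?] at h1
    subst hS
    have hx' : ∀ l ∈ labels, l ∈ x.1 := by
      intro l hl
      have := List.all_eq_true.mp hx l hl
      simpa using this
    show pvStep labels ([], none) x = pvState [x]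
    unfold pvStep pvState
    rw [if_pos hx]
    simp [pvMin?, pvMax?]
  | some m =>
    have hx' : ∀ l ∈ labels, l ∈ x.1 := by
      intro l hl
      have := List.all_eq_true.mp hx l hl
      simpa using this
    have hle : ∀ a ∈ S.map (fun e => (e.1.length : Int)), m ≤ a := pvMin?_le h1
    obtain ⟨e0, he0, he0m⟩ := List.mem_map.mp (pvMin?_mem h1)
    have hT : e0 ∈ S.filter (fun e => ((e.1.length : Int) == m)) := by
      simp [List.mem_filter, he0, he0m]
    cases h2 : pvMax? ((S.filter (fun e => ((e.1.length : Int) == m))).map (fun e => e.2)) with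
    | none =>
      exfalso
      obtain ⟨y, ys, hys⟩ := List.exists_cons_of_ne_nil
        (l := (S.filter (fun e => ((e.1.length : Int) == m))).map (fun e => e.2))
        (by simp only [ne_eq, List.map_eq_nil_iff]; exact List.ne_nil_of_mem hT)
      rw [hys] at h2
      simp [pvMax?] at h2
    | some t =>
      have htle : ∀ e ∈ S.filter (fun e => ((e.1.length : Int) == m)), e.2 ≤ t := by
        intro e he
        exact pvMax?_ge h2 e.2 (List.mem_map.mpr ⟨e, he, rfl⟩)
      rw [pvState_some h1 h2]
      have hmap1 : (S ++ [x]).map (fun e => (e.1.length : Int))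
          = S.map (fun e => (e.1.length : Int)) ++ [(x.1.length : Int)] := by
        simp
      rcases lt_trichotomy ((x.1.length : Int)) m with hlt | heq | hgt
      · -- new strictly smaller length: accumulator resets to [x]
        have h1' : pvMin? ((S ++ [x]).map (fun e => (e.1.length : Int))) = some ((x.1.length : Int)) := by
          rw [hmap1, pvMin?_concat, h1]
          have : min m (x.1.length : Int) = (x.1.length : Int) := min_eq_right hlt.le
          simp [this]
        have hfil : (S ++ [x]).filter (fun e => ((e.1.length : Int) == (x.1.length : Int))) = [x] := by
          rw [List.filter_append]
          have hnil : S.filter (fun e => ((e.1.length : Int) == (x.1.length : Int))) = [] := by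
            apply List.filter_eq_nil_iff.mpr
            intro e he
            have := hle _ (List.mem_map.mpr ⟨e, he, rfl⟩)
            simp only [beq_iff_eq]
            omega
          simp [hnil]
        have h2' : pvMax? (((S ++ [x]).filter (fun e => ((e.1.length : Int) == (x.1.length : Int)))).map
            (fun e => e.2)) = some x.2 := by rw [hfil]; rfl
        rw [pvState_some h1' h2', hfil]
        unfold pvStep
        rw [if_pos hx]
        simp only []
        split_ifs with c1 c2 c3 <;> first | (exfalso; omega) | (exfalso; (simp only [true_and, and_true, gt_iff_lt, not_lt, not_true, lt_self_iff_false] at *) <;> omega) | simp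
      · -- equal length: compare times
        subst heq
        have h1' : pvMin? ((S ++ [x]).map (fun e => (e.1.length : Int))) = some ((x.1.length : Int)) := by
          rw [hmap1, pvMin?_concat, h1]
          simp
        have hfil : (S ++ [x]).filter (fun e => ((e.1.length : Int) == (x.1.length : Int)))
            = S.filter (fun e => ((e.1.length : Int) == (x.1.length : Int))) ++ [x] := by
          rw [List.filter_append]
          simp
        have h2' : pvMax? (((S ++ [x]).filter (fun e => ((e.1.length : Int) == (x.1.length : Int)))).map
            (fun e => e.2)) = some (max t x.2) := by
          rw [hfil, List.map_append]
          simp only [List.map_cons, List.map_nil]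
          rw [pvMax?_concat, h2]
        rcases lt_trichotomy x.2 t with ht | ht | ht
        · -- smaller time: x is dropped, state unchanged
          have hmax : max t x.2 = t := max_eq_left ht.le
          rw [pvState_some h1' (hmax ▸ h2'), hfil]
          have hdrop : (S.filter (fun e => ((e.1.length : Int) == (x.1.length : Int))) ++ [x]).filter
              (fun e => e.2 == t)
              = (S.filter (fun e => ((e.1.length : Int) == (x.1.length : Int)))).filter (fun e => e.2 == t) := by
            rw [List.filter_append]
            simp [ht.ne]
          rw [hdrop]
          unfold pvStep
          rw [if_pos hx]
          simp only []
          split_ifs with c1 c2 c3 <;> first | (exfalso; omega) | (exfalso; (simp only [true_and, and_true, gt_iff_lt, not_lt, not_true, lt_self_iff_false] at *) <;> omega) | simp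
        · -- equal time: x appended to the accumulator
          subst ht
          have hmax : max x.2 x.2 = x.2 := max_self _
          rw [pvState_some h1' (hmax ▸ h2'), hfil]
          have happ : (S.filter (fun e => ((e.1.length : Int) == (x.1.length : Int))) ++ [x]).filter
              (fun e => e.2 == x.2)
              = (S.filter (fun e => ((e.1.length : Int) == (x.1.length : Int)))).filter (fun e => e.2 == x.2)
                ++ [x] := by
            rw [List.filter_append]
            simp
          rw [happ]
          unfold pvStep
          rw [if_pos hx]
          simp only []
          split_ifs with c1 c2 c3 <;> first | (exfalso; omega) | (exfalso; (simp only [true_and, and_true, gt_iff_lt, not_lt, not_true, lt_self_iff_false] at *) <;> omega) | simp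
        · -- larger time: accumulator resets to [x]
          have hmax : max t x.2 = x.2 := max_eq_right ht.le
          rw [pvState_some h1' (hmax ▸ h2'), hfil]
          have hreset : (S.filter (fun e => ((e.1.length : Int) == (x.1.length : Int))) ++ [x]).filter
              (fun e => e.2 == x.2) = [x] := by
            rw [List.filter_append]
            have hnil : (S.filter (fun e => ((e.1.length : Int) == (x.1.length : Int)))).filter
                (fun e => e.2 == x.2) = [] := by
              apply List.filter_eq_nil_iff.mpr
              intro e he
              have := htle e he
              simp only [beq_iff_eq]
              omega
            simp [hnil]
          rw [hreset]
          unfold pvStep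
          rw [if_pos hx]
          simp only []
          split_ifs with c1 c2 c3 <;> first | (exfalso; omega) | (exfalso; (simp only [true_and, and_true, gt_iff_lt, not_lt, not_true, lt_self_iff_false] at *) <;> omega) | simp
      · -- larger length: x is dropped everywhere, state unchanged
        have h1' : pvMin? ((S ++ [x]).map (fun e => (e.1.length : Int))) = some m := by
          rw [hmap1, pvMin?_concat, h1]
          have : min m (x.1.length : Int) = m := min_eq_left hgt.le
          simp [this]
        have hfil : (S ++ [x]).filter (fun e => ((e.1.length : Int) == m))
            = S.filter (fun e => ((e.1.length : Int) == m)) := by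
          rw [List.filter_append]
          simp [hgt.ne']
        rw [pvState_some h1' (hfil ▸ h2), hfil]
        unfold pvStep
        rw [if_pos hx]
        simp only []
        split_ifs with c1 c2 c3 <;> first | (exfalso; omega) | (exfalso; (simp only [true_and, and_true, gt_iff_lt, not_lt, not_true, lt_self_iff_false] at *) <;> omega) | simp

lemma fold_eq_state (labels : List Int) (nodes : List (List Int × Int)) :
    nodes.foldl (pvStep labels) ([], none) = pvState (nodes.filter (fun node => pvSup labels node)) := by
  induction nodes using List.reverseRecOn with
  | nil => rfl
  | append_singleton ns x ih =>
    rw [List.foldl_append, List.foldl_cons, List.foldl_nil, ih, List.filter_append]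
    by_cases hx : labels.all (fun l => x.1.contains l) = true
    · have hxt : pvSup labels x = true := hx
      have : List.filter (fun node => pvSup labels node) [x] = [x] := by
        simp [hxt]
      rw [this]
      exact state_concat labels _ x hx
    · have hxf : pvSup labels x = false := by
        rw [← Bool.not_eq_true]
        exact hx
      have h1 : List.filter (fun node => pvSup labels node) [x] = [] := by
        simp [hxf]
      have h2 : pvStep labels (pvState (List.filter (fun node => pvSup labels node) ns)) x
          = pvState (List.filter (fun node => pvSup labels node) ns) := by
        unfold pvStep
        rw [if_neg hx]
      rw [h1, h2, List.append_nil]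

-- ===== VERDICT (by name: the statement is the Claim_ definition above) =====
theorem MinimalSubset_spec : Claim_equal_MinimalSubset := by
  intro labels nodes _ _
  unfold Spec_MinimalSubset MinimalSubset_alt
  rw [A_eq_state, fold_eq_state]
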